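-- pv_equiv track=rewrite | github.com/shan2312/DSA-Python-Solutions | BFS_Shortest_Path/Q3_covid_contact_tracing.py | find_closest_contact_distance
-- ===== SOURCE A (Python) =====
-- from collections import defaultdict, deque
--
-- NO_CONTACT_WITH_COVID_INFECTED = -1
--
-- def build_graph(edges):
--     graph = defaultdict(list)
--     for edge in edges:
--         node_one, node_two = edge
--         graph[node_one].append(node_two)
--         graph[node_two].append(node_one)
--
--     return graph
--
-- def find_closest_contact_distance(initial_person_id, friendships, infected_people):
--     graph = build_graph(friendships)
--
--     queue = deque()
--     person_tuple = (initial_person_id, 0)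
--     queue.append(person_tuple)
--
--     visited = set()
--     visited.add(initial_person_id)
--
--     while queue:
--         person_id, distance_so_far = queue.popleft()
--
--         if person_id in infected_people:
--             return distance_so_far
--
--         neighbors = graph[person_id]
--         for neighbor in neighbors:
--             if neighbor in visited:
--                 continue
--
--             neighbor_tuple = (neighbor, distance_so_far + 1)
--             queue.append(neighbor_tuple)
--             visited.add(neighbor)
--
--     return NO_CONTACT_WITH_COVID_INFECTED
-- ===== SOURCE B (Python) =====
-- NO_CONTACT_WITH_COVID_INFECTED = -1
--
-- def find_closest_contact_distance(initial_person_id, friendships, infected_people):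
--     # Bellman-Ford style: repeatedly relax every friendship edge instead of BFS
--     nodes = {initial_person_id}
--     for a, b in friendships:
--         nodes.add(a)
--         nodes.add(b)
--     dist = {initial_person_id: 0}
--     for _ in range(len(nodes)):
--         for a, b in friendships:
--             if a in dist and (b not in dist or dist[a] + 1 < dist[b]):
--                 dist[b] = dist[a] + 1
--             if b in dist and (a not in dist or dist[b] + 1 < dist[a]):
--                 dist[a] = dist[b] + 1
--     candidates = [dist[p] for p in infected_people if p in dist]
--     return min(candidates) if candidates else NO_CONTACT_WITH_COVID_INFECTED
-- ===== Notes on version B (the rewrite author's own statement) =====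
-- stated objective: alternative
-- what changed: Replaces A's FIFO-queue BFS with a visited set by Bellman-Ford-style dynamic programming: a distance dictionary is relaxed over every friendship edge for |nodes| rounds, and the answer is the minimum recorded distance over the infected list (no queue, no visited set, no graph adjacency structure).
import Mathlib
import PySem

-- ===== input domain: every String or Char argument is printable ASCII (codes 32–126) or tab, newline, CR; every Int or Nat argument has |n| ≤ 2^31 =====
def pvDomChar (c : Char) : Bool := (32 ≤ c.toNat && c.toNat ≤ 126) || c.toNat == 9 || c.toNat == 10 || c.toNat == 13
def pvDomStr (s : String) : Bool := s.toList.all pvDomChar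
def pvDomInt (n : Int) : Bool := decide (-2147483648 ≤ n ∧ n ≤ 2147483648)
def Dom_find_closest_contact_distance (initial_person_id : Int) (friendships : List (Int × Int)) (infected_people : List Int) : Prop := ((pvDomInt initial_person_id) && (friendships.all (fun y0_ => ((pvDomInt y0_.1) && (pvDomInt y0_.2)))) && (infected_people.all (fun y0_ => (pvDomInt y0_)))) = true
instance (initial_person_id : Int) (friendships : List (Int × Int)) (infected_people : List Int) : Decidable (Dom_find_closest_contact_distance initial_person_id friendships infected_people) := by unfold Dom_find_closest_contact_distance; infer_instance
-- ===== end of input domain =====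

-- B replaces A's FIFO-queue BFS by Bellman-Ford-style edge relaxation: a distance dictionary is
-- relaxed over every friendship edge for |nodes| rounds and the answer is the minimum recorded
-- distance over the infected list; same values, a genuinely different algorithm (objective: alternative).

-- ===== PORT A =====
-- build_graph: defaultdict(list); graph[a].append(b); graph[b].append(a)
def pvGraph (edges : List (Int × Int)) : PySem.Dict Int (List Int) :=
  edges.foldl
    (fun g e => PySem.Dict.modify (PySem.Dict.modify g e.1 [] (· ++ [e.2])) e.2 [] (· ++ [e.1]))
    PySem.Dict.empty

-- A's inner loop: for neighbor in neighbors: if visited continue; queue.append((nb, d+1)); visited.add(nb)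
def aInner (d : Int) (nbrs : List Int) (q : List (Int × Int)) (vis : PySem.Set Int) :
    List (Int × Int) × PySem.Set Int :=
  nbrs.foldl
    (fun st nb => if nb ∈ st.2 then st
                  else (st.1 ++ [(nb, d + 1)], PySem.Set.add st.2 nb))
    (q, vis)

-- A's while loop over the queue; fuel is only a termination guard (proved sufficient below)
def aLoop (g : PySem.Dict Int (List Int)) (inf : List Int) :
    Nat → List (Int × Int) → PySem.Set Int → Option Int
  | 0, _, _ => none
  | _ + 1, [], _ => some (-1)
  | f + 1, (p, d) :: rest, vis =>
      if p ∈ inf then some d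
      else
        let st := aInner d (PySem.Dict.getD g p []) rest vis
        aLoop g inf f st.1 st.2

def find_closest_contact_distance (initial_person_id : Int) (friendships : List (Int × Int)) (infected_people : List Int) : Int :=
  (aLoop (pvGraph friendships) infected_people (4 * friendships.length + 2)
      [(initial_person_id, 0)]
      (PySem.Set.add PySem.Set.empty initial_person_id)).getD (-1)

-- ===== PORT B =====
-- nodes = {initial_person_id}; for a, b in friendships: nodes.add(a); nodes.add(b)
def bNodes (i : Int) (fr : List (Int × Int)) : PySem.Set Int :=
  fr.foldl (fun s e => PySem.Set.add (PySem.Set.add s e.1) e.2) (PySem.Set.add PySem.Set.empty i)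

-- one directed relaxation: if a in dist and (b not in dist or dist[a] + 1 < dist[b]): dist[b] = dist[a] + 1
def bRelaxDir (δ : PySem.Dict Int Int) (a b : Int) : PySem.Dict Int Int :=
  if δ.contains a && (!(δ.contains b) || decide (δ.getD a 0 + 1 < δ.getD b 0)) then
    δ.insert b (δ.getD a 0 + 1)
  else δ

-- both directions for one friendship edge (the loop body of B's inner loop)
def bRelaxEdge (δ : PySem.Dict Int Int) (e : Int × Int) : PySem.Dict Int Int :=
  bRelaxDir (bRelaxDir δ e.1 e.2) e.2 e.1

-- dist = {initial_person_id: 0}; for _ in range(len(nodes)): for a, b in friendships: relax both ways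
def bDist (i : Int) (fr : List (Int × Int)) : PySem.Dict Int Int :=
  (List.range (bNodes i fr).length).foldl
    (fun δ _ => fr.foldl bRelaxEdge δ)
    (PySem.Dict.insert PySem.Dict.empty i 0)

-- candidates = [dist[p] for p in infected_people if p in dist]; min(candidates) if candidates else -1
def find_closest_contact_distance_alt (initial_person_id : Int) (friendships : List (Int × Int)) (infected_people : List Int) : Int :=
  match infected_people.filterMap (fun p => (bDist initial_person_id friendships).get? p) with
  | [] => -1
  | c :: cs => cs.foldl min c

-- ===== PRECONDITION & SPEC =====
def Spec_find_closest_contact_distance (initial_person_id : Int) (friendships : List (Int × Int)) (infected_people : List Int) (out : Int) : Prop := out = find_closest_contact_distance_alt initial_person_id friendships infected_people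
instance (initial_person_id : Int) (friendships : List (Int × Int)) (infected_people : List Int) (out : Int) : Decidable (Spec_find_closest_contact_distance initial_person_id friendships infected_people out) := by unfold Spec_find_closest_contact_distance; infer_instance

-- ===== CLAIM (what is proved, stated in full; the proofs are below) =====
def Claim_equal_find_closest_contact_distance : Prop := ∀ (initial_person_id : Int) (friendships : List (Int × Int)) (infected_people : List Int), Dom_find_closest_contact_distance initial_person_id friendships infected_people → Spec_find_closest_contact_distance initial_person_id friendships infected_people (find_closest_contact_distance initial_person_id friendships infected_people)

-- ===== LEMMAS AND PROOFS =====

-- ---------- level-synchronous description of BFS (proof device shared by both sides) ----------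

-- the nodes of nbrs accepted (not yet visited) in order, and the visited set afterwards
def newNodes : List Int → PySem.Set Int → List Int
  | [], _ => []
  | nb :: t, vis =>
      if nb ∈ vis then newNodes t vis
      else nb :: newNodes t (PySem.Set.add vis nb)

def visAfter : List Int → PySem.Set Int → PySem.Set Int
  | [], vis => vis
  | nb :: t, vis =>
      if nb ∈ vis then visAfter t vis
      else visAfter t (PySem.Set.add vis nb)

-- expansion of a whole level
def expandL (g : PySem.Dict Int (List Int)) : List Int → PySem.Set Int → List Int × PySem.Set Int
  | [], vis => ([], vis)
  | p :: ps, vis =>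
      let n := newNodes (PySem.Dict.getD g p []) vis
      let r := expandL g ps (visAfter (PySem.Dict.getD g p []) vis)
      (n ++ r.1, r.2)

-- the BFS levels: (LV g i d).1 = nodes first reached at distance d, (LV g i d).2 = nodes within distance d
def LV (g : PySem.Dict Int (List Int)) (i : Int) : Nat → List Int × PySem.Set Int
  | 0 => ([i], PySem.Set.add PySem.Set.empty i)
  | n + 1 => expandL g (LV g i n).1 (LV g i n).2

-- level loop with an infected check, mirroring A one whole level at a time
def lExpand (g : PySem.Dict Int (List Int)) (lvl : List Int) (nl : List Int) (vis : PySem.Set Int) :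
    List Int × PySem.Set Int :=
  lvl.foldl (fun st p =>
    (PySem.Dict.getD g p []).foldl
      (fun st nb => if nb ∈ st.2 then st else (st.1 ++ [nb], PySem.Set.add st.2 nb)) st)
    (nl, vis)

def lLoop (g : PySem.Dict Int (List Int)) (inf : List Int) :
    Nat → List Int → PySem.Set Int → Int → Option Int
  | 0, _, _, _ => none
  | _ + 1, [], _, _ => some (-1)
  | f + 1, lvl@(_ :: _), vis, d =>
      if lvl.any (fun p => decide (p ∈ inf)) then some d
      else
        let st := lExpand g lvl [] vis
        lLoop g inf f st.1 st.2 (d + 1)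

theorem aInner_spec (d : Int) (nbrs : List Int) (q : List (Int × Int)) (vis : PySem.Set Int) :
    aInner d nbrs q vis = (q ++ (newNodes nbrs vis).map (fun x => (x, d + 1)), visAfter nbrs vis) := by
  induction nbrs generalizing q vis with
  | nil => simp [aInner, newNodes, visAfter]
  | cons nb t ih =>
      by_cases h : nb ∈ vis <;>
        simp only [aInner, List.foldl_cons, newNodes, visAfter] at ih ⊢ <;>
        simp [h, ih, List.append_assoc]

theorem lInner_spec (nbrs : List Int) (nl : List Int) (vis : PySem.Set Int) :
    nbrs.foldl (fun st nb => if nb ∈ st.2 then st else (st.1 ++ [nb], PySem.Set.add st.2 nb))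
        ((nl, vis) : List Int × PySem.Set Int) = (nl ++ newNodes nbrs vis, visAfter nbrs vis) := by
  induction nbrs generalizing nl vis with
  | nil => simp [newNodes, visAfter]
  | cons nb t ih =>
      by_cases h : nb ∈ vis <;>
        simp only [List.foldl_cons, newNodes, visAfter] at ih ⊢ <;>
        simp [h, ih, List.append_assoc]

theorem lExpand_spec (g : PySem.Dict Int (List Int)) (lvl nl : List Int) (vis : PySem.Set Int) :
    lExpand g lvl nl vis = (nl ++ (expandL g lvl vis).1, (expandL g lvl vis).2) := by
  induction lvl generalizing nl vis with
  | nil => simp [lExpand, expandL]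
  | cons p ps ih =>
      simp only [lExpand, List.foldl_cons, expandL, lInner_spec] at ih ⊢
      simp [ih, List.append_assoc]

-- one whole level of A's queue loop equals one step of the level loop
theorem aLoop_level (g : PySem.Dict Int (List Int)) (inf : List Int) (d : Int) :
    ∀ (lvl nxt : List Int) (vis : PySem.Set Int) (f : Nat),
    aLoop g inf (lvl.length + f)
        (lvl.map (fun x => (x, d)) ++ nxt.map (fun x => (x, d + 1))) vis =
      if lvl.any (fun p => decide (p ∈ inf)) then some d
      else aLoop g inf f ((nxt ++ (expandL g lvl vis).1).map (fun x => (x, d + 1)))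
        (expandL g lvl vis).2 := by
  intro lvl
  induction lvl with
  | nil => intro nxt vis f; simp [expandL]
  | cons p ps ih =>
      intro nxt vis f
      simp only [List.length_cons, List.map_cons, List.cons_append, Nat.succ_add, aLoop]
      by_cases hp : p ∈ inf
      · simp [hp]
      · simp only [hp, if_false, aInner_spec]
        have h1 : (ps.map (fun x => (x, d)) ++ nxt.map (fun x => (x, d + 1))) ++
            (newNodes (PySem.Dict.getD g p []) vis).map (fun x => (x, d + 1)) =
            ps.map (fun x => (x, d)) ++ (nxt ++ newNodes (PySem.Dict.getD g p []) vis).map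
              (fun x => (x, d + 1)) := by
          simp [List.map_append, List.append_assoc]
        rw [h1, ih (nxt ++ newNodes (PySem.Dict.getD g p []) vis)
              (visAfter (PySem.Dict.getD g p []) vis) f]
        simp [expandL, hp, List.append_assoc]

theorem aLoop_mono (g : PySem.Dict Int (List Int)) (inf : List Int) :
    ∀ (f : Nat) (q : List (Int × Int)) (vis : PySem.Set Int) (r : Int),
    aLoop g inf f q vis = some r → aLoop g inf (f + 1) q vis = some r := by
  intro f
  induction f with
  | zero => intro q vis r h; simp [aLoop] at h
  | succ f ih =>
      intro q vis r h
      match q with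
      | [] => simpa [aLoop] using h
      | (p, d) :: rest =>
          simp only [aLoop] at h ⊢
          by_cases hp : p ∈ inf
          · simpa [hp] using h
          · simp only [hp, if_false] at h ⊢
            exact ih _ _ _ h

theorem aLoop_le (g : PySem.Dict Int (List Int)) (inf : List Int)
    (f f' : Nat) (q : List (Int × Int)) (vis : PySem.Set Int) (r : Int)
    (hle : f ≤ f') (h : aLoop g inf f q vis = some r) : aLoop g inf f' q vis = some r := by
  induction f' with
  | zero => have : f = 0 := by omega
            subst this; exact h
  | succ f' ih =>
      rcases Nat.lt_or_ge f (f' + 1) with hlt | hge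
      · exact aLoop_mono g inf f' q vis r (ih (by omega))
      · have : f = f' + 1 := by omega
        subst this; exact h

-- the level loop returning some r implies A's loop returns some r with enough fuel
theorem bridge (g : PySem.Dict Int (List Int)) (inf : List Int) :
    ∀ (f : Nat) (lvl : List Int) (vis : PySem.Set Int) (d : Int) (r : Int),
    lLoop g inf f lvl vis d = some r →
      ∃ fa, aLoop g inf fa (lvl.map (fun x => (x, d))) vis = some r := by
  intro f
  induction f with
  | zero => intro lvl vis d r h; simp [lLoop] at h
  | succ f ih =>
      intro lvl vis d r h
      match lvl with
      | [] =>
          refine ⟨1, ?_⟩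
          simp [lLoop] at h
          simp [aLoop, ← h]
      | p :: ps =>
          simp only [lLoop] at h
          by_cases hany : (p :: ps).any (fun p => decide (p ∈ inf)) = true
          · refine ⟨(p :: ps).length + 1, ?_⟩
            have := aLoop_level g inf d (p :: ps) [] vis 1
            simp only [List.map_nil, List.append_nil, hany, if_true] at this
            rw [this]; simpa [hany] using h
          · simp only [hany, lExpand_spec] at h
            simp only [List.nil_append] at h
            obtain ⟨fa, hfa⟩ := ih _ _ _ _ h
            refine ⟨(p :: ps).length + fa, ?_⟩
            have := aLoop_level g inf d (p :: ps) [] vis fa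
            simp only [List.map_nil, List.append_nil, hany] at this
            rw [this]
            simpa using hfa

-- ---------- termination: the fuel 4*len+2 is sufficient for both loops ----------

-- all endpoints of the friendship list
def nodesU (edges : List (Int × Int)) : PySem.Set Int :=
  edges.foldl (fun s e => PySem.Set.add (PySem.Set.add s e.1) e.2) []

-- count of universe nodes not yet visited
def U (edges : List (Int × Int)) (vis : PySem.Set Int) : Nat :=
  ((nodesU edges).filter (fun x => !(vis.contains x))).length

theorem setAdd_len (s : PySem.Set Int) (x : Int) :
    (PySem.Set.add s x).length ≤ s.length + 1 := by
  rw [PySem.Set.add_eq_ite]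
  split_ifs <;> simp

theorem nodesU_aux (edges : List (Int × Int)) :
    ∀ s : PySem.Set Int,
    (edges.foldl (fun s e => PySem.Set.add (PySem.Set.add s e.1) e.2) s).length ≤
      s.length + 2 * edges.length := by
  induction edges with
  | nil => intro s; simp
  | cons e t ih =>
      intro s
      have h1 := setAdd_len s e.1
      have h2 := setAdd_len (PySem.Set.add s e.1) e.2
      have h3 := ih (PySem.Set.add (PySem.Set.add s e.1) e.2)
      simp only [List.foldl_cons, List.length_cons]
      omega

theorem nodesU_card (edges : List (Int × Int)) : (nodesU edges).length ≤ 2 * edges.length := by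
  simpa using nodesU_aux edges []

theorem graph_aux (edges : List (Int × Int)) :
    ∀ (g : PySem.Dict Int (List Int)) (s : PySem.Set Int),
    (∀ p x, x ∈ PySem.Dict.getD g p [] → x ∈ s) →
    ∀ p x,
      x ∈ PySem.Dict.getD
        (edges.foldl
          (fun g e => PySem.Dict.modify (PySem.Dict.modify g e.1 [] (· ++ [e.2])) e.2 [] (· ++ [e.1])) g) p [] →
      x ∈ edges.foldl (fun s e => PySem.Set.add (PySem.Set.add s e.1) e.2) s := by
  induction edges with
  | nil => intro g s h p x hx; exact h p x hx
  | cons e t ih =>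
      intro g s h p x hx
      simp only [List.foldl_cons] at hx ⊢
      refine ih _ _ ?_ p x hx
      intro q y hy
      have hmem : ∀ z : Int, z ∈ s ∨ z = e.1 ∨ z = e.2 →
          z ∈ PySem.Set.add (PySem.Set.add s e.1) e.2 := by
        intro z hz
        rcases hz with hz | hz | hz
        · exact (PySem.Set.mem_add _ _ _).mpr (Or.inl ((PySem.Set.mem_add _ _ _).mpr (Or.inl hz)))
        · exact (PySem.Set.mem_add _ _ _).mpr (Or.inl ((PySem.Set.mem_add _ _ _).mpr (Or.inr hz)))
        · exact (PySem.Set.mem_add _ _ _).mpr (Or.inr hz)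
      by_cases hqb : q = e.2
      · subst hqb
        rw [PySem.Dict.getD_modify_self] at hy
        rcases List.mem_append.mp hy with hy | hy
        · by_cases hba : e.2 = e.1
          · rw [hba, PySem.Dict.getD_modify_self] at hy
            rcases List.mem_append.mp hy with hy | hy
            · exact hmem y (Or.inl (h _ y hy))
            · exact hmem y (Or.inr (Or.inl (List.mem_singleton.mp hy)))
          · rw [PySem.Dict.getD_modify_of_ne _ _ _ hba] at hy
            exact hmem y (Or.inl (h _ y hy))
        · exact hmem y (Or.inr (Or.inl (List.mem_singleton.mp hy)))
      · rw [PySem.Dict.getD_modify_of_ne _ _ _ hqb] at hy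
        by_cases hqa : q = e.1
        · subst hqa
          rw [PySem.Dict.getD_modify_self] at hy
          rcases List.mem_append.mp hy with hy | hy
          · exact hmem y (Or.inl (h _ y hy))
          · exact hmem y (Or.inr (Or.inr (List.mem_singleton.mp hy)))
        · rw [PySem.Dict.getD_modify_of_ne _ _ _ hqa] at hy
          exact hmem y (Or.inl (h _ y hy))

theorem mem_graph_mem_nodes (edges : List (Int × Int)) (p x : Int)
    (h : x ∈ PySem.Dict.getD (pvGraph edges) p []) : x ∈ nodesU edges := by
  refine graph_aux edges PySem.Dict.empty [] ?_ p x h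
  intro q y hy
  simp [PySem.Dict.getD, PySem.Dict.get?, PySem.Dict.empty] at hy

theorem filt_le (l : List Int) (vis vis' : PySem.Set Int) (hsub : ∀ y, y ∈ vis → y ∈ vis') :
    (l.filter (fun y => !(vis'.contains y))).length ≤
      (l.filter (fun y => !(vis.contains y))).length := by
  induction l with
  | nil => simp
  | cons a t ih =>
      simp only [List.filter_cons]
      by_cases ha : a ∈ vis
      · have h1 : (!(vis.contains a)) = false := by simp [ha]
        have h2 : (!(vis'.contains a)) = false := by simp [hsub a ha]
        simp only [h1, h2, Bool.false_eq_true, if_false]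
        exact ih
      · have h1 : (!(vis.contains a)) = true := by simp [ha]
        simp only [h1, if_true]
        by_cases ha' : a ∈ vis'
        · have h2 : (!(vis'.contains a)) = false := by simp [ha']
          simp only [h2, Bool.false_eq_true, if_false, List.length_cons]
          omega
        · have h2 : (!(vis'.contains a)) = true := by simp [ha']
          simp only [h2, if_true, List.length_cons]
          omega

theorem U_add_lt (edges : List (Int × Int)) (vis : PySem.Set Int) (x : Int)
    (hx : x ∈ nodesU edges) (hv : ¬ x ∈ vis) :
    U edges (PySem.Set.add vis x) < U edges vis := by
  obtain ⟨l1, l2, hl⟩ := List.append_of_mem hx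
  unfold U
  rw [hl]
  have hxadd : x ∈ PySem.Set.add vis x := (PySem.Set.mem_add _ _ _).mpr (Or.inr rfl)
  have h1 := filt_le l1 vis (PySem.Set.add vis x) (fun y hy => (PySem.Set.mem_add _ _ _).mpr (Or.inl hy))
  have h2 := filt_le l2 vis (PySem.Set.add vis x) (fun y hy => (PySem.Set.mem_add _ _ _).mpr (Or.inl hy))
  have hpt : (!(vis.contains x)) = true := by simp [hv]
  have hpf : (!((PySem.Set.add vis x).contains x)) = false := by simp [hxadd]
  rw [List.filter_append, List.filter_append, List.filter_cons, List.filter_cons]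
  simp only [hpt, hpf, if_true, Bool.false_eq_true, if_false, List.length_append, List.length_cons]
  omega

theorem U_visAfter (edges : List (Int × Int)) (nbrs : List Int) :
    ∀ vis : PySem.Set Int, (∀ x ∈ nbrs, x ∈ nodesU edges) →
    U edges (visAfter nbrs vis) + (newNodes nbrs vis).length ≤ U edges vis := by
  induction nbrs with
  | nil => intro vis _; simp [visAfter, newNodes]
  | cons nb t ih =>
      intro vis hn
      by_cases h : nb ∈ vis
      · simp only [visAfter, newNodes, if_pos h]
        exact ih vis (fun x hx => hn x (List.mem_cons_of_mem _ hx))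
      · simp only [visAfter, newNodes, if_neg h, List.length_cons]
        have h1 := ih (PySem.Set.add vis nb) (fun x hx => hn x (List.mem_cons_of_mem _ hx))
        have h2 := U_add_lt edges vis nb (hn nb List.mem_cons_self) h
        omega

theorem U_expandL (edges : List (Int × Int)) (lvl : List Int) :
    ∀ vis : PySem.Set Int,
    U edges (expandL (pvGraph edges) lvl vis).2 + (expandL (pvGraph edges) lvl vis).1.length ≤
      U edges vis := by
  induction lvl with
  | nil => intro vis; simp [expandL]
  | cons p ps ih =>
      intro vis
      simp only [expandL, List.length_append]
      have h1 := U_visAfter edges (PySem.Dict.getD (pvGraph edges) p []) vis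
        (fun x hx => mem_graph_mem_nodes edges p x hx)
      have h2 := ih (visAfter (PySem.Dict.getD (pvGraph edges) p []) vis)
      omega

theorem aLoop_term (edges : List (Int × Int)) (inf : List Int) :
    ∀ (n : Nat) (q : List (Int × Int)) (vis : PySem.Set Int),
    2 * U edges vis + q.length < n →
      (aLoop (pvGraph edges) inf n q vis).isSome := by
  intro n
  induction n with
  | zero => intro q vis h; omega
  | succ n ih =>
      intro q vis h
      match q with
      | [] => simp [aLoop]
      | (p, d) :: rest =>
          simp only [aLoop]
          by_cases hp : p ∈ inf
          · simp [hp]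
          · simp only [hp, if_false, aInner_spec]
            apply ih
            have h1 := U_visAfter edges (PySem.Dict.getD (pvGraph edges) p []) vis
              (fun x hx => mem_graph_mem_nodes edges p x hx)
            simp only [List.length_append, List.length_map, List.length_cons] at h ⊢
            omega

theorem lLoop_term (edges : List (Int × Int)) (inf : List Int) :
    ∀ (n : Nat) (lvl : List Int) (vis : PySem.Set Int) (d : Int),
    U edges vis + 2 ≤ n →
      (lLoop (pvGraph edges) inf n lvl vis d).isSome := by
  intro n
  induction n with
  | zero => intro lvl vis d h; omega
  | succ n ih =>
      intro lvl vis d h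
      match lvl with
      | [] => simp [lLoop]
      | p :: ps =>
          simp only [lLoop]
          by_cases hany : (p :: ps).any (fun p => decide (p ∈ inf)) = true
          · simp [hany]
          · rw [if_neg hany]
            simp only [lExpand_spec, List.nil_append]
            have hU := U_expandL edges (p :: ps) vis
            match hE : (expandL (pvGraph edges) (p :: ps) vis).1 with
            | [] =>
                match n, h with
                | n' + 1, _ => simp [lLoop]
            | q :: qs =>
                apply ih
                rw [hE] at hU
                simp only [List.length_cons] at hU
                omega

theorem U_le (edges : List (Int × Int)) (vis : PySem.Set Int) :
    U edges vis ≤ 2 * edges.length := by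
  have h1 := List.length_filter_le (fun x => !(vis.contains x)) (nodesU edges)
  have h2 := nodesU_card edges
  unfold U
  omega

-- ---------- membership facts about levels ----------

theorem mem_newNodes (x : Int) : ∀ (nbrs : List Int) (vis : PySem.Set Int),
    x ∈ newNodes nbrs vis ↔ x ∈ nbrs ∧ x ∉ vis := by
  intro nbrs
  induction nbrs with
  | nil => intro vis; simp [newNodes]
  | cons nb t ih =>
      intro vis
      by_cases h : nb ∈ vis
      · simp only [newNodes, if_pos h, ih, List.mem_cons]
        constructor
        · rintro ⟨hx, hv⟩; exact ⟨Or.inr hx, hv⟩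
        · rintro ⟨hx | hx, hv⟩
          · subst hx; exact absurd h hv
          · exact ⟨hx, hv⟩
      · simp only [newNodes, if_neg h, List.mem_cons, ih, PySem.Set.mem_add]
        constructor
        · rintro (rfl | ⟨hx, hv⟩)
          · exact ⟨Or.inl rfl, h⟩
          · exact ⟨Or.inr hx, fun hc => hv (Or.inl hc)⟩
        · rintro ⟨rfl | hx, hv⟩
          · exact Or.inl rfl
          · by_cases hxe : x = nb
            · exact Or.inl hxe
            · exact Or.inr ⟨hx, fun hc => (by rcases hc with hc | hc; exact hv hc; exact hxe hc : False)⟩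

theorem mem_visAfter (x : Int) : ∀ (nbrs : List Int) (vis : PySem.Set Int),
    x ∈ visAfter nbrs vis ↔ x ∈ vis ∨ x ∈ nbrs := by
  intro nbrs
  induction nbrs with
  | nil => intro vis; simp [visAfter]
  | cons nb t ih =>
      intro vis
      by_cases h : nb ∈ vis
      · simp only [visAfter, if_pos h, ih, List.mem_cons]
        constructor
        · rintro (hv | hx); exact Or.inl hv; exact Or.inr (Or.inr hx)
        · rintro (hv | rfl | hx); exact Or.inl hv; exact Or.inl h; exact Or.inr hx
      · simp only [visAfter, if_neg h, ih, PySem.Set.mem_add, List.mem_cons]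
        tauto

theorem mem_expand_fst (g : PySem.Dict Int (List Int)) (x : Int) :
    ∀ (lvl : List Int) (vis : PySem.Set Int),
    x ∈ (expandL g lvl vis).1 ↔ x ∉ vis ∧ ∃ p ∈ lvl, x ∈ PySem.Dict.getD g p [] := by
  intro lvl
  induction lvl with
  | nil => intro vis; simp [expandL]
  | cons p ps ih =>
      intro vis
      simp only [expandL, List.mem_append, mem_newNodes, ih, mem_visAfter, List.mem_cons]
      constructor
      · rintro (⟨hx, hv⟩ | ⟨hv, q, hq, hx⟩)
        · exact ⟨hv, p, Or.inl rfl, hx⟩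
        · exact ⟨fun hc => hv (Or.inl hc), q, Or.inr hq, hx⟩
      · rintro ⟨hv, q, rfl | hq, hx⟩
        · exact Or.inl ⟨hx, hv⟩
        · by_cases hn : x ∈ PySem.Dict.getD g p []
          · exact Or.inl ⟨hn, hv⟩
          · exact Or.inr ⟨fun hc => (by rcases hc with hc | hc; exact hv hc; exact hn hc : False),
              q, hq, hx⟩

theorem mem_expand_snd (g : PySem.Dict Int (List Int)) (x : Int) :
    ∀ (lvl : List Int) (vis : PySem.Set Int),
    x ∈ (expandL g lvl vis).2 ↔ x ∈ vis ∨ x ∈ (expandL g lvl vis).1 := by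
  intro lvl
  induction lvl with
  | nil => intro vis; simp [expandL]
  | cons p ps ih =>
      intro vis
      simp only [expandL, ih, mem_visAfter, List.mem_append, mem_newNodes, mem_expand_fst]
      constructor
      · rintro ((hv | hn) | ⟨hv, q, hq, hx⟩)
        · exact Or.inl hv
        · by_cases hvv : x ∈ vis
          · exact Or.inl hvv
          · exact Or.inr (Or.inl ⟨hn, hvv⟩)
        · by_cases hvv : x ∈ vis
          · exact Or.inl hvv
          · by_cases hn : x ∈ PySem.Dict.getD g p []
            · exact Or.inr (Or.inl ⟨hn, hvv⟩)
            · exact Or.inr (Or.inr ⟨fun hc => (by rcases hc with hc | hc; exact hvv hc; exact hn hc : False), q, hq, hx⟩)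
      · rintro (hv | ⟨hn, hv⟩ | ⟨hv, q, hq, hx⟩)
        · exact Or.inl (Or.inl hv)
        · exact Or.inl (Or.inr hn)
        · exact Or.inr ⟨hv, q, hq, hx⟩

-- membership in V n: reached within n levels
theorem mem_V_succ (g : PySem.Dict Int (List Int)) (i x : Int) (n : Nat) :
    x ∈ (LV g i (n + 1)).2 ↔ x ∈ (LV g i n).2 ∨ x ∈ (LV g i (n + 1)).1 := by
  simp only [LV, mem_expand_snd]

theorem V_mono (g : PySem.Dict Int (List Int)) (i x : Int) {n n' : Nat} (h : n ≤ n')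
    (hx : x ∈ (LV g i n).2) : x ∈ (LV g i n').2 := by
  induction n' with
  | zero => have : n = 0 := by omega
            subst this; exact hx
  | succ n' ih =>
      rcases Nat.lt_or_ge n (n' + 1) with hlt | hge
      · exact (mem_V_succ g i x n').mpr (Or.inl (ih (by omega)))
      · have : n = n' + 1 := by omega
        subst this; exact hx

theorem L_subset_V (g : PySem.Dict Int (List Int)) (i x : Int) (n : Nat)
    (hx : x ∈ (LV g i n).1) : x ∈ (LV g i n).2 := by
  match n with
  | 0 => simp only [LV] at hx ⊢
         simp only [PySem.Set.mem_add]
         simp only [List.mem_singleton] at hx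
         exact Or.inr hx
  | n + 1 => exact (mem_V_succ g i x n).mpr (Or.inr hx)

theorem mem_V_iff (g : PySem.Dict Int (List Int)) (i x : Int) (n : Nat) :
    x ∈ (LV g i n).2 ↔ ∃ j ≤ n, x ∈ (LV g i j).1 := by
  induction n with
  | zero =>
      simp only [LV, PySem.Set.mem_add]
      constructor
      · rintro (h | rfl)
        · simp [PySem.Set.empty] at h
        · exact ⟨0, le_refl _, by simp [LV]⟩
      · rintro ⟨j, hj, hx⟩
        have : j = 0 := by omega
        subst this
        simp only [LV, List.mem_singleton] at hx
        exact Or.inr hx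
  | succ n ih =>
      rw [mem_V_succ, ih]
      constructor
      · rintro (⟨j, hj, hx⟩ | hx)
        · exact ⟨j, by omega, hx⟩
        · exact ⟨n + 1, le_refl _, hx⟩
      · rintro ⟨j, hj, hx⟩
        rcases Nat.lt_or_ge j (n + 1) with hlt | hge
        · exact Or.inl ⟨j, by omega, hx⟩
        · have : j = n + 1 := by omega
          subst this; exact Or.inr hx

theorem nbr_in_V (g : PySem.Dict Int (List Int)) (i p x : Int) (n : Nat)
    (hp : p ∈ (LV g i n).2) (hx : x ∈ PySem.Dict.getD g p []) : x ∈ (LV g i (n + 1)).2 := by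
  obtain ⟨j, hj, hpl⟩ := (mem_V_iff g i p n).mp hp
  by_cases hv : x ∈ (LV g i j).2
  · exact V_mono g i x (by omega) hv
  · have : x ∈ (LV g i (j + 1)).1 := by
      simp only [LV, mem_expand_fst]
      exact ⟨hv, p, hpl, hx⟩
    exact V_mono g i x (by omega) (L_subset_V g i x (j + 1) this)

theorem L_empty_stable (g : PySem.Dict Int (List Int)) (i : Int) (d : Nat)
    (h : (LV g i d).1 = []) : ∀ j, d ≤ j → (LV g i j).1 = [] := by
  intro j hj
  induction j with
  | zero => have : d = 0 := by omega
            subst this; exact h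
  | succ j ih =>
      rcases Nat.lt_or_ge d (j + 1) with hlt | hge
      · have hje : (LV g i j).1 = [] := ih (by omega)
        show (expandL g (LV g i j).1 (LV g i j).2).1 = []
        rw [hje]; simp [expandL]
      · have : d = j + 1 := by omega
        subst this; exact h

-- ---------- characterization of the level loop ----------

theorem lLoop_char (g : PySem.Dict Int (List Int)) (inf : List Int) (i : Int) :
    ∀ (f : Nat) (d : Nat) (r : Int),
    lLoop g inf f (LV g i d).1 (LV g i d).2 (d : Int) = some r →
      (∃ D : Nat, d ≤ D ∧ r = (D : Int) ∧ (∃ p ∈ (LV g i D).1, p ∈ inf) ∧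
        (∀ j : Nat, d ≤ j → j < D → ∀ p ∈ (LV g i j).1, p ∉ inf)) ∨
      (r = -1 ∧ ∀ j : Nat, d ≤ j → ∀ p ∈ (LV g i j).1, p ∉ inf) := by
  intro f
  induction f with
  | zero => intro d r h; simp [lLoop] at h
  | succ f ih =>
      intro d r h
      match hL : (LV g i d).1 with
      | [] =>
          rw [hL] at h
          simp only [lLoop, Option.some_inj] at h
          refine Or.inr ⟨h.symm, ?_⟩
          intro j hj p hp
          rw [L_empty_stable g i d hL j hj] at hp
          simp at hp
      | q :: qs =>
          rw [hL] at h
          simp only [lLoop] at h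
          by_cases hany : (q :: qs).any (fun p => decide (p ∈ inf)) = true
          · rw [if_pos hany] at h
            simp only [Option.some_inj] at h
            obtain ⟨p, hp, hpi⟩ := List.any_eq_true.mp hany
            refine Or.inl ⟨d, le_refl _, h.symm, ⟨p, by rw [hL]; exact hp, of_decide_eq_true hpi⟩, ?_⟩
            intro j hj1 hj2; omega
          · rw [if_neg hany] at h
            rw [lExpand_spec] at h
            simp only [List.nil_append] at h
            have hnext : (expandL g (q :: qs) (LV g i d).2).1 = (LV g i (d + 1)).1 ∧
                (expandL g (q :: qs) (LV g i d).2).2 = (LV g i (d + 1)).2 := by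
              constructor <;> simp [LV, hL]
            rw [hnext.1, hnext.2] at h
            have hcast : ((d : Int) + 1) = ((d + 1 : Nat) : Int) := by push_cast; ring
            rw [hcast] at h
            rcases ih (d + 1) r h with ⟨D, hD1, hD2, hD3, hD4⟩ | ⟨hr, hall⟩
            · refine Or.inl ⟨D, by omega, hD2, hD3, ?_⟩
              intro j hj1 hj2 p hp
              rcases Nat.lt_or_ge j (d + 1) with hlt | hge
              · have : j = d := by omega
                subst this
                rw [hL] at hp
                intro hpi
                exact hany (List.any_eq_true.mpr ⟨p, hp, decide_eq_true hpi⟩)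
              · exact hD4 j hge hj2 p hp
            · refine Or.inr ⟨hr, ?_⟩
              intro j hj p hp
              rcases Nat.lt_or_ge j (d + 1) with hlt | hge
              · have : j = d := by omega
                subst this
                rw [hL] at hp
                intro hpi
                exact hany (List.any_eq_true.mpr ⟨p, hp, decide_eq_true hpi⟩)
              · exact hall j hge p hp

-- ---------- edge / graph correspondence ----------

theorem getD_modify_mem (g : PySem.Dict Int (List Int)) (q p x y : Int)
    (h : x ∈ PySem.Dict.getD g p []) :
    x ∈ PySem.Dict.getD (PySem.Dict.modify g q [] (· ++ [y])) p [] := by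
  by_cases hpq : p = q
  · subst hpq
    rw [PySem.Dict.getD_modify_self]
    exact List.mem_append.mpr (Or.inl h)
  · rw [PySem.Dict.getD_modify_of_ne _ _ _ hpq]
    exact h

theorem nbr_of_edge_aux (edges : List (Int × Int)) :
    ∀ (g : PySem.Dict Int (List Int)) (a b : Int),
    ((a, b) ∈ edges ∨ (b ∈ PySem.Dict.getD g a [] ∧ a ∈ PySem.Dict.getD g b [])) →
    b ∈ PySem.Dict.getD
        (edges.foldl
          (fun g e => PySem.Dict.modify (PySem.Dict.modify g e.1 [] (· ++ [e.2])) e.2 [] (· ++ [e.1])) g) a [] ∧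
    a ∈ PySem.Dict.getD
        (edges.foldl
          (fun g e => PySem.Dict.modify (PySem.Dict.modify g e.1 [] (· ++ [e.2])) e.2 [] (· ++ [e.1])) g) b [] := by
  induction edges with
  | nil =>
      intro g a b h
      rcases h with h | h
      · simp at h
      · exact h
  | cons e t ih =>
      intro g a b h
      simp only [List.foldl_cons]
      apply ih
      rcases h with h | h
      · rcases List.mem_cons.mp h with he | ht
        · right
          have h1 : b ∈ PySem.Dict.getD (PySem.Dict.modify g e.1 [] (· ++ [e.2])) e.1 [] := by
            have : e = (a, b) := he.symm ▸ rfl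
            rw [this]
            rw [PySem.Dict.getD_modify_self]
            simp
          have heab : e.1 = a ∧ e.2 = b := by
            rw [show e = (a, b) from he.symm ▸ rfl]; exact ⟨rfl, rfl⟩
          constructor
          · rw [← heab.1, ← heab.2]
            apply getD_modify_mem
            rw [PySem.Dict.getD_modify_self]
            simp
          · rw [← heab.1, ← heab.2]
            rw [PySem.Dict.getD_modify_self]
            simp
        · exact Or.inl ht
      · right
        exact ⟨getD_modify_mem _ _ _ _ _ (getD_modify_mem _ _ _ _ _ h.1),
               getD_modify_mem _ _ _ _ _ (getD_modify_mem _ _ _ _ _ h.2)⟩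

theorem nbr_of_edge (edges : List (Int × Int)) (a b : Int) (h : (a, b) ∈ edges) :
    b ∈ PySem.Dict.getD (pvGraph edges) a [] ∧ a ∈ PySem.Dict.getD (pvGraph edges) b [] :=
  nbr_of_edge_aux edges PySem.Dict.empty a b (Or.inl h)

theorem getD_modify_cases (g : PySem.Dict Int (List Int)) (k q y z : Int)
    (h : y ∈ PySem.Dict.getD (PySem.Dict.modify g k [] (· ++ [z])) q []) :
    y ∈ PySem.Dict.getD g q [] ∨ (q = k ∧ y = z) := by
  by_cases hqk : q = k
  · subst hqk
    rw [PySem.Dict.getD_modify_self] at h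
    rcases List.mem_append.mp h with h | h
    · exact Or.inl h
    · exact Or.inr ⟨rfl, List.mem_singleton.mp h⟩
  · rw [PySem.Dict.getD_modify_of_ne _ _ _ hqk] at h
    exact Or.inl h

theorem edge_of_nbr_aux (P : Int → Int → Prop) :
    ∀ (edges : List (Int × Int)), (∀ e ∈ edges, P e.1 e.2 ∧ P e.2 e.1) →
    ∀ g : PySem.Dict Int (List Int), (∀ p x, x ∈ PySem.Dict.getD g p [] → P p x) →
    ∀ p x,
      x ∈ PySem.Dict.getD
        (edges.foldl
          (fun g e => PySem.Dict.modify (PySem.Dict.modify g e.1 [] (· ++ [e.2])) e.2 [] (· ++ [e.1])) g) p [] →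
      P p x := by
  intro edges
  induction edges with
  | nil => intro _ g hg p x hx; exact hg p x hx
  | cons e t ih =>
      intro hP g hg p x hx
      simp only [List.foldl_cons] at hx
      refine ih (fun e' he' => hP e' (List.mem_cons_of_mem _ he')) _ ?_ p x hx
      intro q y hy
      rcases getD_modify_cases _ _ _ _ _ hy with hy | ⟨rfl, rfl⟩
      · rcases getD_modify_cases _ _ _ _ _ hy with hy | ⟨rfl, rfl⟩
        · exact hg q y hy
        · exact (hP e List.mem_cons_self).1
      · exact (hP e List.mem_cons_self).2

theorem edge_of_nbr_graph (edges : List (Int × Int)) (p x : Int)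
    (h : x ∈ PySem.Dict.getD (pvGraph edges) p []) : (p, x) ∈ edges ∨ (x, p) ∈ edges := by
  refine edge_of_nbr_aux (fun p x => (p, x) ∈ edges ∨ (x, p) ∈ edges) edges
    (fun e he => ⟨Or.inl (by simpa using he), Or.inr (by simpa using he)⟩)
    PySem.Dict.empty ?_ p x h
  intro q y hy
  simp [PySem.Dict.getD, PySem.Dict.get?, PySem.Dict.empty] at hy

-- ---------- Bellman-Ford side ----------

-- pointwise domination: keys persist and values never increase under relaxation
def DLE (δ δ' : PySem.Dict Int Int) : Prop :=
  ∀ v m, δ.get? v = some m → ∃ m', δ'.get? v = some m' ∧ m' ≤ m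

theorem DLE_refl (δ : PySem.Dict Int Int) : DLE δ δ := by
  intro v m h; exact ⟨m, h, le_refl _⟩

theorem DLE_trans {δ1 δ2 δ3 : PySem.Dict Int Int} (h1 : DLE δ1 δ2) (h2 : DLE δ2 δ3) :
    DLE δ1 δ3 := by
  intro v m h
  obtain ⟨m', hm', hle'⟩ := h1 v m h
  obtain ⟨m'', hm'', hle''⟩ := h2 v m' hm'
  exact ⟨m'', hm'', le_trans hle'' hle'⟩

theorem get?_eq_some_getD (δ : PySem.Dict Int Int) (a : Int) (h : δ.contains a = true) :
    δ.get? a = some (δ.getD a 0) := by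
  rw [PySem.Dict.contains_eq_isSome_get?] at h
  obtain ⟨m, hm⟩ := Option.isSome_iff_exists.mp h
  rw [hm]
  simp [PySem.Dict.getD, hm]

theorem contains_of_get? (δ : PySem.Dict Int Int) (a m : Int) (h : δ.get? a = some m) :
    δ.contains a = true := by
  rw [PySem.Dict.contains_eq_isSome_get?, h]
  rfl

theorem getD_of_get? (δ : PySem.Dict Int Int) (a m : Int) (h : δ.get? a = some m) :
    δ.getD a 0 = m := by
  simp [PySem.Dict.getD, h]

theorem DLE_relaxDir (δ : PySem.Dict Int Int) (a b : Int) : DLE δ (bRelaxDir δ a b) := by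
  intro v m h
  unfold bRelaxDir
  split_ifs with hc
  · by_cases hvb : v = b
    · subst hvb
      rw [PySem.Dict.get?_insert_self]
      refine ⟨δ.getD a 0 + 1, rfl, ?_⟩
      have hcb : δ.contains v = true := contains_of_get? δ v m h
      simp only [Bool.and_eq_true, Bool.or_eq_true, Bool.not_eq_true', hcb] at hc
      rcases hc.2 with h1 | h1
      · simp at h1
      · have h2 := of_decide_eq_true h1
        rw [getD_of_get? δ v m h] at h2
        omega
    · rw [PySem.Dict.get?_insert_of_ne _ _ hvb]
      exact ⟨m, h, le_refl _⟩
  · exact ⟨m, h, le_refl _⟩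

theorem DLE_relaxEdge (δ : PySem.Dict Int Int) (e : Int × Int) : DLE δ (bRelaxEdge δ e) :=
  DLE_trans (DLE_relaxDir δ e.1 e.2) (DLE_relaxDir _ e.2 e.1)

theorem DLE_foldl_relax (fr : List (Int × Int)) : ∀ δ, DLE δ (fr.foldl bRelaxEdge δ) := by
  induction fr with
  | nil => intro δ; exact DLE_refl δ
  | cons e t ih =>
      intro δ
      exact DLE_trans (DLE_relaxEdge δ e) (ih (bRelaxEdge δ e))

-- relaxing the edge (a,b) bounds dist[b] by dist[a] + 1
theorem relaxDir_upper (δ : PySem.Dict Int Int) (a b : Int) (m : Int)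
    (h : δ.get? a = some m) :
    ∃ m', (bRelaxDir δ a b).get? b = some m' ∧ m' ≤ m + 1 := by
  have hca : δ.contains a = true := contains_of_get? δ a m h
  have hda : δ.getD a 0 = m := getD_of_get? δ a m h
  unfold bRelaxDir
  split_ifs with hc
  · exact ⟨δ.getD a 0 + 1, PySem.Dict.get?_insert_self _ _ _, by omega⟩
  · simp only [Bool.and_eq_true, Bool.or_eq_true, Bool.not_eq_true', hca, true_and,
      decide_eq_true_eq, not_or, not_lt] at hc
    have hcb : δ.contains b = true := by
      cases hb : δ.contains b with
      | false => exact absurd hb hc.1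
      | true => rfl
    refine ⟨δ.getD b 0, get?_eq_some_getD δ b hcb, ?_⟩
    have := hc.2
    omega

theorem relaxEdge_upper (δ : PySem.Dict Int Int) (e : Int × Int) (p v m : Int)
    (hor : (e.1 = p ∧ e.2 = v) ∨ (e.1 = v ∧ e.2 = p))
    (h : δ.get? p = some m) :
    ∃ m', (bRelaxEdge δ e).get? v = some m' ∧ m' ≤ m + 1 := by
  unfold bRelaxEdge
  rcases hor with ⟨h1, h2⟩ | ⟨h1, h2⟩
  · have h' : δ.get? e.1 = some m := by rw [h1]; exact h
    obtain ⟨m1, hm1, hle1⟩ := relaxDir_upper δ e.1 e.2 m h'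
    obtain ⟨m2, hm2, hle2⟩ := DLE_relaxDir (bRelaxDir δ e.1 e.2) e.2 e.1 e.2 m1 hm1
    exact ⟨m2, by rw [← h2]; exact hm2, by omega⟩
  · have h' : δ.get? e.2 = some m := by rw [h2]; exact h
    obtain ⟨m1, hm1, hle1⟩ := DLE_relaxDir δ e.1 e.2 e.2 m h'
    obtain ⟨m2, hm2, hle2⟩ := relaxDir_upper (bRelaxDir δ e.1 e.2) e.2 e.1 m1 hm1
    exact ⟨m2, by rw [← h1]; exact hm2, by omega⟩

theorem foldl_relax_upper (fr : List (Int × Int)) (δ : PySem.Dict Int Int) (e : Int × Int)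
    (he : e ∈ fr) (p v m : Int)
    (hor : (e.1 = p ∧ e.2 = v) ∨ (e.1 = v ∧ e.2 = p))
    (h : δ.get? p = some m) :
    ∃ m', (fr.foldl bRelaxEdge δ).get? v = some m' ∧ m' ≤ m + 1 := by
  obtain ⟨l1, l2, rfl⟩ := List.append_of_mem he
  rw [List.foldl_append, List.foldl_cons]
  obtain ⟨m1, h1, hle1⟩ := DLE_foldl_relax l1 δ p m h
  obtain ⟨m2, h2, hle2⟩ := relaxEdge_upper _ e p v m1 hor h1
  obtain ⟨m3, h3, hle3⟩ := DLE_foldl_relax l2 _ v m2 h2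
  exact ⟨m3, h3, by omega⟩

-- soundness: every recorded distance m puts its node within the radius-m ball
def BSound (g : PySem.Dict Int (List Int)) (i : Int) (fr : List (Int × Int))
    (δ : PySem.Dict Int Int) : Prop :=
  ∀ v m, δ.get? v = some m → ∃ n : Nat, m = (n : Int) ∧ v ∈ (LV g i n).2

theorem BSound_relaxDir (i : Int) (fr : List (Int × Int)) (δ : PySem.Dict Int Int) (a b : Int)
    (hnb : b ∈ PySem.Dict.getD (pvGraph fr) a [])
    (hs : BSound (pvGraph fr) i fr δ) : BSound (pvGraph fr) i fr (bRelaxDir δ a b) := by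
  intro v m h
  unfold bRelaxDir at h
  split_ifs at h with hc
  · by_cases hvb : v = b
    · subst hvb
      rw [PySem.Dict.get?_insert_self] at h
      have hm : m = δ.getD a 0 + 1 := (Option.some_inj.mp h).symm
      have hca : δ.contains a = true := by
        cases hb : δ.contains a with
        | false => rw [hb] at hc; simp at hc
        | true => rfl
      have hga := get?_eq_some_getD δ a hca
      obtain ⟨n, hn1, hn2⟩ := hs a (δ.getD a 0) hga
      refine ⟨n + 1, by push_cast; omega, ?_⟩
      exact nbr_in_V (pvGraph fr) i a v n hn2 hnb
    · rw [PySem.Dict.get?_insert_of_ne _ _ hvb] at h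
      exact hs v m h
  · exact hs v m h

theorem BSound_relaxEdge (i : Int) (fr : List (Int × Int)) (δ : PySem.Dict Int Int)
    (e : Int × Int) (he : e ∈ fr)
    (hs : BSound (pvGraph fr) i fr δ) : BSound (pvGraph fr) i fr (bRelaxEdge δ e) := by
  have hn := nbr_of_edge fr e.1 e.2 (by simpa using he)
  exact BSound_relaxDir i fr _ e.2 e.1 hn.2 (BSound_relaxDir i fr δ e.1 e.2 hn.1 hs)

theorem BSound_foldl (i : Int) (fr : List (Int × Int)) :
    ∀ (l : List (Int × Int)), (∀ e ∈ l, e ∈ fr) → ∀ δ, BSound (pvGraph fr) i fr δ →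
    BSound (pvGraph fr) i fr (l.foldl bRelaxEdge δ) := by
  intro l
  induction l with
  | nil => intro _ δ hs; exact hs
  | cons e t ih =>
      intro hl δ hs
      simp only [List.foldl_cons]
      exact ih (fun e' he' => hl e' (List.mem_cons_of_mem _ he')) _
        (BSound_relaxEdge i fr δ e (hl e List.mem_cons_self) hs)

theorem BSound_init (i : Int) (fr : List (Int × Int)) :
    BSound (pvGraph fr) i fr (PySem.Dict.insert PySem.Dict.empty i 0) := by
  intro v m h
  by_cases hvi : v = i
  · subst hvi
    rw [PySem.Dict.get?_insert_self] at h
    refine ⟨0, by rw [← Option.some_inj.mp h]; rfl, ?_⟩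
    show v ∈ (LV (pvGraph fr) v 0).2
    simp [LV]
  · rw [PySem.Dict.get?_insert_of_ne _ _ hvi] at h
    simp [PySem.Dict.get?, PySem.Dict.empty] at h

theorem BSound_bDist (i : Int) (fr : List (Int × Int)) :
    BSound (pvGraph fr) i fr (bDist i fr) := by
  unfold bDist
  have key : ∀ (l : List Nat) (δ : PySem.Dict Int Int), BSound (pvGraph fr) i fr δ →
      BSound (pvGraph fr) i fr (l.foldl (fun δ _ => fr.foldl bRelaxEdge δ) δ) := by
    intro l
    induction l with
    | nil => intro δ hs; exact hs
    | cons k t ih =>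
        intro δ hs
        simp only [List.foldl_cons]
        exact ih _ (BSound_foldl i fr fr (fun e he => he) δ hs)
  exact key _ _ (BSound_init i fr)

-- completeness: after k rounds every node of level d ≤ k carries a value ≤ d
def BComp (g : PySem.Dict Int (List Int)) (i : Int) (k : Nat) (δ : PySem.Dict Int Int) : Prop :=
  ∀ d : Nat, d ≤ k → ∀ v ∈ (LV g i d).1, ∃ m : Int, δ.get? v = some m ∧ m ≤ (d : Int)

theorem BComp_of_DLE (g : PySem.Dict Int (List Int)) (i : Int) (k : Nat)
    {δ δ' : PySem.Dict Int Int} (hd : DLE δ δ') (h : BComp g i k δ) : BComp g i k δ' := by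
  intro d hdk v hv
  obtain ⟨m, hm, hle⟩ := h d hdk v hv
  obtain ⟨m', hm', hle'⟩ := hd v m hm
  exact ⟨m', hm', le_trans hle' hle⟩

theorem BComp_round (i : Int) (fr : List (Int × Int)) (k : Nat) (δ : PySem.Dict Int Int)
    (h : BComp (pvGraph fr) i k δ) : BComp (pvGraph fr) i (k + 1) (fr.foldl bRelaxEdge δ) := by
  intro d hdk v hv
  rcases Nat.lt_or_ge d (k + 1) with hlt | hge
  · exact BComp_of_DLE (pvGraph fr) i k (DLE_foldl_relax fr δ) h d (by omega) v hv
  · have hd : d = k + 1 := by omega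
    subst hd
    have hv' : v ∈ (expandL (pvGraph fr) (LV (pvGraph fr) i k).1 (LV (pvGraph fr) i k).2).1 := hv
    rw [mem_expand_fst] at hv'
    obtain ⟨hnv, p, hp, hnbr⟩ := hv'
    obtain ⟨m, hm, hmle⟩ := h k (le_refl _) p hp
    rcases edge_of_nbr_graph fr p v hnbr with he | he
    · obtain ⟨m', hm', hle'⟩ := foldl_relax_upper fr δ (p, v) he p v m (Or.inl ⟨rfl, rfl⟩) hm
      exact ⟨m', hm', by push_cast; omega⟩
    · obtain ⟨m', hm', hle'⟩ := foldl_relax_upper fr δ (v, p) he p v m (Or.inr ⟨rfl, rfl⟩) hm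
      exact ⟨m', hm', by push_cast; omega⟩

theorem BComp_init (i : Int) (fr : List (Int × Int)) :
    BComp (pvGraph fr) i 0 (PySem.Dict.insert PySem.Dict.empty i 0) := by
  intro d hd v hv
  have hd0 : d = 0 := by omega
  subst hd0
  simp only [LV, List.mem_singleton] at hv
  subst hv
  exact ⟨0, PySem.Dict.get?_insert_self _ _ _, by omega⟩

theorem BComp_bDist (i : Int) (fr : List (Int × Int)) :
    BComp (pvGraph fr) i (bNodes i fr).length (bDist i fr) := by
  unfold bDist
  have key : ∀ (n : Nat) (δ : PySem.Dict Int Int), BComp (pvGraph fr) i 0 δ →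
      BComp (pvGraph fr) i n ((List.range n).foldl (fun δ _ => fr.foldl bRelaxEdge δ) δ) := by
    intro n
    induction n with
    | zero => intro δ h; simpa using h
    | succ n ih =>
        intro δ h
        rw [List.range_succ, List.foldl_append, List.foldl_cons, List.foldl_nil]
        exact BComp_round i fr n _ (ih δ h)
  exact key _ _ (BComp_init i fr)

-- ---------- counting: a nonempty level d implies d < |nodes| ----------

theorem mem_fold_add (edges : List (Int × Int)) :
    ∀ (s : PySem.Set Int) (x : Int),
    x ∈ edges.foldl (fun s e => PySem.Set.add (PySem.Set.add s e.1) e.2) s ↔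
      x ∈ s ∨ ∃ e ∈ edges, x = e.1 ∨ x = e.2 := by
  induction edges with
  | nil => intro s x; simp
  | cons e t ih =>
      intro s x
      simp only [List.foldl_cons, ih, PySem.Set.mem_add, List.mem_cons]
      constructor
      · rintro (((hs | h1) | h2) | ⟨e', he', h⟩)
        · exact Or.inl hs
        · exact Or.inr ⟨e, Or.inl rfl, Or.inl h1⟩
        · exact Or.inr ⟨e, Or.inl rfl, Or.inr h2⟩
        · exact Or.inr ⟨e', Or.inr he', h⟩
      · rintro (hs | ⟨e', rfl | he', h⟩)
        · exact Or.inl (Or.inl (Or.inl hs))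
        · rcases h with h | h
          · exact Or.inl (Or.inl (Or.inr h))
          · exact Or.inl (Or.inr h)
        · exact Or.inr ⟨e', he', h⟩

theorem nodup_fold_add (edges : List (Int × Int)) :
    ∀ (s : PySem.Set Int), s.Nodup →
    (edges.foldl (fun s e => PySem.Set.add (PySem.Set.add s e.1) e.2) s).Nodup := by
  induction edges with
  | nil => intro s h; exact h
  | cons e t ih =>
      intro s h
      simp only [List.foldl_cons]
      exact ih _ (PySem.Set.nodup_add _ _ (PySem.Set.nodup_add _ _ h))

theorem bNodes_card (i : Int) (fr : List (Int × Int)) :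
    (bNodes i fr).length = U fr (PySem.Set.add PySem.Set.empty i) + 1 := by
  have hi : PySem.Set.add PySem.Set.empty i = [i] := by
    rw [PySem.Set.add_eq_ite]; simp [PySem.Set.empty]
  have hndB : (bNodes i fr).Nodup := by
    apply nodup_fold_add
    rw [hi]; exact List.nodup_singleton i
  have hndU : (nodesU fr).Nodup := nodup_fold_add fr [] List.nodup_nil
  set l' := i :: ((nodesU fr).filter (fun x => !((PySem.Set.add PySem.Set.empty i).contains x))) with hl'
  have hfil : ∀ x : Int, x ∈ (nodesU fr).filter
      (fun x => !((PySem.Set.add PySem.Set.empty i).contains x)) ↔ x ∈ nodesU fr ∧ x ≠ i := by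
    intro x
    rw [List.mem_filter, hi]
    simp
  have hndl' : l'.Nodup := by
    rw [hl']
    refine List.nodup_cons.mpr ⟨?_, List.Nodup.filter _ hndU⟩
    intro hc
    exact ((hfil i).mp hc).2 rfl
  have hmem : ∀ x, x ∈ l' ↔ x ∈ bNodes i fr := by
    intro x
    rw [hl']
    simp only [List.mem_cons, hfil]
    rw [bNodes, mem_fold_add, nodesU, mem_fold_add, hi]
    constructor
    · rintro (rfl | ⟨h, _⟩)
      · exact Or.inl (List.mem_singleton.mpr rfl)
      · rcases h with h | h
        · simp at h
        · exact Or.inr h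
    · rintro (h | h)
      · exact Or.inl (List.mem_singleton.mp h)
      · by_cases hxi : x = i
        · exact Or.inl hxi
        · exact Or.inr ⟨Or.inr h, hxi⟩
  have hperm : l'.Perm (bNodes i fr) := (List.perm_ext_iff_of_nodup hndl' hndB).mpr hmem
  have hlen := hperm.length_eq
  rw [hl'] at hlen
  simp only [List.length_cons] at hlen
  unfold U
  omega

theorem U_level_chain (i : Int) (fr : List (Int × Int)) :
    ∀ d : Nat, (LV (pvGraph fr) i d).1 ≠ [] →
      U fr (LV (pvGraph fr) i d).2 + d ≤ U fr (LV (pvGraph fr) i 0).2 := by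
  intro d
  induction d with
  | zero => intro _; omega
  | succ d ih =>
      intro hne
      have hdne : (LV (pvGraph fr) i d).1 ≠ [] := by
        intro hc
        apply hne
        show (expandL (pvGraph fr) (LV (pvGraph fr) i d).1 (LV (pvGraph fr) i d).2).1 = []
        rw [hc]; rfl
      have h1 := ih hdne
      have h2 := U_expandL fr (LV (pvGraph fr) i d).1 (LV (pvGraph fr) i d).2
      have h3 : (LV (pvGraph fr) i (d + 1)).1 ≠ [] := hne
      have h4 : 1 ≤ (expandL (pvGraph fr) (LV (pvGraph fr) i d).1 (LV (pvGraph fr) i d).2).1.length := by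
        have h5 : (expandL (pvGraph fr) (LV (pvGraph fr) i d).1 (LV (pvGraph fr) i d).2).1 ≠ [] := h3
        have := List.length_pos_of_ne_nil h5
        omega
      show U fr (expandL (pvGraph fr) (LV (pvGraph fr) i d).1 (LV (pvGraph fr) i d).2).2 + (d + 1) ≤ _
      omega

theorem level_lt_nodes (i : Int) (fr : List (Int × Int)) (D : Nat)
    (h : (LV (pvGraph fr) i D).1 ≠ []) : D < (bNodes i fr).length := by
  have h1 := U_level_chain i fr D h
  have h2 : (LV (pvGraph fr) i 0).2 = PySem.Set.add PySem.Set.empty i := rfl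
  rw [h2] at h1
  rw [bNodes_card]
  omega

-- ---------- the minimum over candidates ----------

theorem foldl_min_le_init : ∀ (cs : List Int) (c : Int), cs.foldl min c ≤ c := by
  intro cs
  induction cs with
  | nil => intro c; exact le_refl c
  | cons a t ih => intro c; exact le_trans (ih (min c a)) (min_le_left c a)

theorem foldl_min_le (c : Int) (cs : List Int) (x : Int) (hx : x ∈ c :: cs) :
    cs.foldl min c ≤ x := by
  induction cs generalizing c with
  | nil =>
      simp only [List.mem_singleton] at hx
      subst hx; exact le_refl x
  | cons a t ih =>
      simp only [List.mem_cons] at hx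
      simp only [List.foldl_cons]
      rcases hx with rfl | rfl | hx
      · exact le_trans (foldl_min_le_init t (min x a)) (min_le_left x a)
      · exact le_trans (foldl_min_le_init t (min c x)) (min_le_right c x)
      · exact ih (min c a) (List.mem_cons.mpr (Or.inr hx))

theorem foldl_min_mem (c : Int) (cs : List Int) : cs.foldl min c ∈ c :: cs := by
  induction cs generalizing c with
  | nil => exact List.mem_singleton.mpr rfl
  | cons a t ih =>
      simp only [List.foldl_cons]
      rcases List.mem_cons.mp (ih (min c a)) with h | h
      · rw [h]
        rcases min_choice c a with hm | hm <;> rw [hm]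
        · exact List.mem_cons_self
        · exact List.mem_cons.mpr (Or.inr List.mem_cons_self)
      · exact List.mem_cons.mpr (Or.inr (List.mem_cons.mpr (Or.inr h)))

-- ---------- assembling B's value ----------

theorem alt_char_found (i : Int) (fr : List (Int × Int)) (inf : List Int) (D : Nat)
    (hfound : ∃ p ∈ (LV (pvGraph fr) i D).1, p ∈ inf)
    (hmin : ∀ j : Nat, j < D → ∀ p ∈ (LV (pvGraph fr) i j).1, p ∉ inf) :
    find_closest_contact_distance_alt i fr inf = (D : Int) := by
  obtain ⟨p, hpL, hpinf⟩ := hfound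
  have hne : (LV (pvGraph fr) i D).1 ≠ [] := by
    intro hc; rw [hc] at hpL; simp at hpL
  have hDlt := level_lt_nodes i fr D hne
  obtain ⟨m, hm, hmle⟩ := BComp_bDist i fr D (by omega) p hpL
  have hlb : ∀ q mq, q ∈ inf → (bDist i fr).get? q = some mq → (D : Int) ≤ mq := by
    intro q mq hq hget
    obtain ⟨n, rfl, hVn⟩ := BSound_bDist i fr q mq hget
    obtain ⟨j, hj, hLj⟩ := (mem_V_iff (pvGraph fr) i q n).mp hVn
    have hjD : ¬ j < D := fun hlt => hmin j hlt q hLj hq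
    omega
  have hmD : m = (D : Int) := le_antisymm hmle (hlb p m hpinf hm)
  have hDmem : (D : Int) ∈ inf.filterMap (fun q => (bDist i fr).get? q) :=
    List.mem_filterMap.mpr ⟨p, hpinf, by rw [hm, hmD]⟩
  have hall : ∀ x ∈ inf.filterMap (fun q => (bDist i fr).get? q), (D : Int) ≤ x := by
    intro x hx
    obtain ⟨q, hq, hget⟩ := List.mem_filterMap.mp hx
    exact hlb q x hq hget
  unfold find_closest_contact_distance_alt
  rcases hLc : inf.filterMap (fun q => (bDist i fr).get? q) with _ | ⟨c, cs⟩
  · rw [hLc] at hDmem; simp at hDmem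
  · rw [hLc] at hDmem hall
    exact le_antisymm (foldl_min_le c cs _ hDmem) (hall _ (foldl_min_mem c cs))

theorem alt_char_none (i : Int) (fr : List (Int × Int)) (inf : List Int)
    (hnone : ∀ j : Nat, ∀ p ∈ (LV (pvGraph fr) i j).1, p ∉ inf) :
    find_closest_contact_distance_alt i fr inf = -1 := by
  have hnil : inf.filterMap (fun q => (bDist i fr).get? q) = [] := by
    rw [List.filterMap_eq_nil_iff]
    intro q hq
    rcases hv : (bDist i fr).get? q with _ | m
    · rfl
    · exfalso
      obtain ⟨n, _, hVn⟩ := BSound_bDist i fr q m hv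
      obtain ⟨j, _, hLj⟩ := (mem_V_iff (pvGraph fr) i q n).mp hVn
      exact hnone j q hLj hq
  unfold find_closest_contact_distance_alt
  rw [hnil]

-- ===== VERDICT (by name: the statement is the Claim_ definition above) =====
theorem find_closest_contact_distance_spec : Claim_equal_find_closest_contact_distance := by
  intro i fr inf _
  unfold Spec_find_closest_contact_distance
  unfold find_closest_contact_distance
  have hL : (lLoop (pvGraph fr) inf (4 * fr.length + 2) [i]
      (PySem.Set.add PySem.Set.empty i) 0).isSome :=
    lLoop_term fr inf (4 * fr.length + 2) [i] (PySem.Set.add PySem.Set.empty i) 0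
      (by have := U_le fr (PySem.Set.add PySem.Set.empty i); omega)
  obtain ⟨rB, hrB⟩ := Option.isSome_iff_exists.mp hL
  have hA : (aLoop (pvGraph fr) inf (4 * fr.length + 2) [(i, 0)]
      (PySem.Set.add PySem.Set.empty i)).isSome :=
    aLoop_term fr inf (4 * fr.length + 2) [(i, 0)] (PySem.Set.add PySem.Set.empty i)
      (by have := U_le fr (PySem.Set.add PySem.Set.empty i);
          simp only [List.length_cons, List.length_nil]; omega)
  obtain ⟨rA, hrA⟩ := Option.isSome_iff_exists.mp hA
  obtain ⟨fa, hfa⟩ := bridge (pvGraph fr) inf (4 * fr.length + 2) [i]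
      (PySem.Set.add PySem.Set.empty i) 0 rB hrB
  simp only [List.map_cons, List.map_nil] at hfa
  have hrA' := aLoop_le (pvGraph fr) inf (4 * fr.length + 2) (max (4 * fr.length + 2) fa)
      _ _ _ (le_max_left _ _) hrA
  have hfa' := aLoop_le (pvGraph fr) inf fa (max (4 * fr.length + 2) fa)
      _ _ _ (le_max_right _ _) hfa
  rw [hrA'] at hfa'
  have hAB : rA = rB := Option.some_inj.mp hfa'
  rw [hrA, Option.getD_some, hAB]
  -- characterize rB via the level loop at level 0
  have h0 : lLoop (pvGraph fr) inf (4 * fr.length + 2)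
      (LV (pvGraph fr) i 0).1 (LV (pvGraph fr) i 0).2 ((0 : Nat) : Int) = some rB := by
    simpa [LV] using hrB
  rcases lLoop_char (pvGraph fr) inf i (4 * fr.length + 2) 0 rB h0 with
    ⟨D, _, hD2, hD3, hD4⟩ | ⟨hr, hall⟩
  · rw [hD2]
    exact (alt_char_found i fr inf D hD3 (fun j hj => hD4 j (by omega) hj)).symm
  · rw [hr]
    exact (alt_char_none i fr inf (fun j => hall j (by omega))).symm
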